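-- pv_equiv track=rewrite | github.com/maxmurtazin/Ant-RH | scripts/run_v14_8_braid_graph_laplacian_hadamard.py | clamp_word_to_dim
-- ===== SOURCE A (Python) =====
-- from typing import Any, DefaultDict, Dict, Iterable, List, Optional, Sequence, Tuple
--
-- Token = Tuple[int, int]  # (generator index i>=1, power p!=0)
--
-- def simplify_word(word: List[Token], *, max_power: int, max_word_len: int) -> List[Token]:
--     out: List[Token] = []
--     for i, p in word:
--         i = int(i)
--         p = int(max(-max_power, min(max_power, int(p))))
--         if p == 0:
--             continue
--         if out and out[-1][0] == i:
--             pp = int(out[-1][1] + p)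
--             pp = int(max(-max_power, min(max_power, pp)))
--             out[-1] = (i, pp)
--             if out[-1][1] == 0:
--                 out.pop()
--             continue
--         out.append((i, p))
--         if len(out) >= int(max_word_len):
--             break
--     return out
--
-- def clamp_word_to_dim(word: List[Token], dim: int, max_power: int, max_word_len: int) -> List[Token]:
--     out: List[Token] = []
--     for i, p in word:
--         ii = int(max(1, min(int(dim) - 1, int(i))))
--         pp = int(max(-max_power, min(max_power, int(p))))
--         if pp == 0:
--             continue
--         out.append((ii, pp))
--     return simplify_word(out, max_power=max_power, max_word_len=max_word_len)
-- ===== SOURCE B (Python) =====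
-- def clamp_word_to_dim(word, dim, max_power, max_word_len):
--     # Single scan holding the last token in a register `top` instead of mutating out[-1];
--     # `done` only ever receives finished tokens (or gives one back when top cancels to 0).
--     done = []
--     top = None
--     for i, p in word:
--         ii = max(1, min(dim - 1, i))
--         pp = max(-max_power, min(max_power, p))
--         if pp == 0:
--             continue
--         if top is not None and top[0] == ii:
--             s = max(-max_power, min(max_power, top[1] + pp))
--             top = (ii, s) if s != 0 else (done.pop() if done else None)
--         else:
--             if top is not None:
--                 done.append(top)
--             top = (ii, pp)
--             if len(done) + 1 >= max_word_len:
--                 break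
--     return done + ([top] if top is not None else [])
-- ===== Notes on version B (the rewrite author's own statement) =====
-- stated objective: alternative
-- what changed: B replaces A's two staged passes (clamp/filter into an intermediate list, then simplify_word mutating out[-1]) by a single scan whose state is a list of finished tokens plus the last token held in a separate register `top`; merging and cancellation act on the register, and a cancelled register is refilled by popping the finished list.
import Mathlib
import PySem

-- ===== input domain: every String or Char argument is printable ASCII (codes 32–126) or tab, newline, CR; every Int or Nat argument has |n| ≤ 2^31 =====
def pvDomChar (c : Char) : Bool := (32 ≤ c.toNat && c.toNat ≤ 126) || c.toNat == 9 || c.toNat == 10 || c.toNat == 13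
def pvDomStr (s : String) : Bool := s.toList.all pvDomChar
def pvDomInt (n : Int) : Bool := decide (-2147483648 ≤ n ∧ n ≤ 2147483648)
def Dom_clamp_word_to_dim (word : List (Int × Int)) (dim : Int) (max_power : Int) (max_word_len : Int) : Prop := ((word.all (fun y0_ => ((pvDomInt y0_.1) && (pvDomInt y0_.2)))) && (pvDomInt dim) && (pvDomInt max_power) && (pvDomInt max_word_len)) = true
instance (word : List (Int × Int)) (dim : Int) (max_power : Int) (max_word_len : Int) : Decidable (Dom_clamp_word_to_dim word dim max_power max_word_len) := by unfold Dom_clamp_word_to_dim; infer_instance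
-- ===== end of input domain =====

-- B replaces A's two passes (clamp into a list, then simplify_word mutating out[-1]) by one scan
-- holding the last token in a register, with a list of finished tokens (objective: alternative).

-- ===== PORT A =====
-- simplify_word's loop (with its break) as structural recursion: state = the growing `out`.
def pvSimplifyAux (max_power max_word_len : Int) : List (Int × Int) → List (Int × Int) → List (Int × Int)
  | out, [] => out
  | out, (i, p) :: rest =>
    let pp := max (-max_power) (min max_power p)
    if pp = 0 then pvSimplifyAux max_power max_word_len out rest
    else
      match out.getLast? with
      | some (j, q) =>
        if j = i then
          let s := max (-max_power) (min max_power (q + pp))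
          let out1 := out.dropLast ++ [(i, s)]
          let out2 := if s = 0 then out1.dropLast else out1
          pvSimplifyAux max_power max_word_len out2 rest
        else
          let out1 := out ++ [(i, pp)]
          if max_word_len ≤ (out1.length : Int) then out1
          else pvSimplifyAux max_power max_word_len out1 rest
      | none =>
        let out1 := out ++ [(i, pp)]
        if max_word_len ≤ (out1.length : Int) then out1
        else pvSimplifyAux max_power max_word_len out1 rest

def pvSimplifyWord (word : List (Int × Int)) (max_power max_word_len : Int) : List (Int × Int) :=
  pvSimplifyAux max_power max_word_len [] word

def clamp_word_to_dim (word : List (Int × Int)) (dim : Int) (max_power : Int) (max_word_len : Int) : List (Int × Int) :=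
  let out := word.foldl (fun out t =>
    let ii := max 1 (min (dim - 1) t.1)
    let pp := max (-max_power) (min max_power t.2)
    if pp = 0 then out else out ++ [(ii, pp)]) []
  pvSimplifyWord out max_power max_word_len

-- ===== PORT B =====
-- B's state: `done` (finished tokens, a Python list appended/popped at the tail — represented
-- here reversed, so append = cons and pop = head) and `top`, an Option register for the last token.
def pvRegAux (dim max_power max_word_len : Int) :
    List (Int × Int) → Option (Int × Int) → List (Int × Int) → List (Int × Int) × Option (Int × Int)
  | rdone, top, [] => (rdone, top)
  | rdone, top, (i, p) :: rest =>
    let ii := max 1 (min (dim - 1) i)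
    let pp := max (-max_power) (min max_power p)
    if pp = 0 then pvRegAux dim max_power max_word_len rdone top rest
    else
      match top with
      | some (j, q) =>
        if j = ii then
          let s := max (-max_power) (min max_power (q + pp))
          if s = 0 then
            match rdone with
            | [] => pvRegAux dim max_power max_word_len [] none rest
            | t :: ts => pvRegAux dim max_power max_word_len ts (some t) rest
          else pvRegAux dim max_power max_word_len rdone (some (ii, s)) rest
        else
          let rdone1 := (j, q) :: rdone
          if max_word_len ≤ (rdone1.length : Int) + 1 then (rdone1, some (ii, pp))
          else pvRegAux dim max_power max_word_len rdone1 (some (ii, pp)) rest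
      | none =>
        if max_word_len ≤ (rdone.length : Int) + 1 then (rdone, some (ii, pp))
        else pvRegAux dim max_power max_word_len rdone (some (ii, pp)) rest

def clamp_word_to_dim_alt (word : List (Int × Int)) (dim : Int) (max_power : Int) (max_word_len : Int) : List (Int × Int) :=
  let st := pvRegAux dim max_power max_word_len [] none word
  st.1.reverse ++ (match st.2 with | some t => [t] | none => [])

-- ===== PRECONDITION & SPEC =====
def Spec_clamp_word_to_dim (word : List (Int × Int)) (dim : Int) (max_power : Int) (max_word_len : Int) (out : List (Int × Int)) : Prop := out = clamp_word_to_dim_alt word dim max_power max_word_len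
instance (word : List (Int × Int)) (dim : Int) (max_power : Int) (max_word_len : Int) (out : List (Int × Int)) : Decidable (Spec_clamp_word_to_dim word dim max_power max_word_len out) := by unfold Spec_clamp_word_to_dim; infer_instance

-- ===== CLAIM =====
def Claim_equal_clamp_word_to_dim : Prop := ∀ (word : List (Int × Int)) (dim : Int) (max_power : Int) (max_word_len : Int), Dom_clamp_word_to_dim word dim max_power max_word_len → Spec_clamp_word_to_dim word dim max_power max_word_len (clamp_word_to_dim word dim max_power max_word_len)

-- ===== LEMMAS AND PROOFS =====

-- A's first pass, as a structural recursion (for reasoning about the foldl).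
def pvClampList (dim max_power : Int) : List (Int × Int) → List (Int × Int)
  | [] => []
  | (i, p) :: rest =>
    let ii := max 1 (min (dim - 1) i)
    let pp := max (-max_power) (min max_power p)
    if pp = 0 then pvClampList dim max_power rest
    else (ii, pp) :: pvClampList dim max_power rest

theorem pvFoldl_eq_clampList (dim max_power : Int) (word : List (Int × Int)) (acc : List (Int × Int)) :
    word.foldl (fun out t =>
      let ii := max 1 (min (dim - 1) t.1)
      let pp := max (-max_power) (min max_power t.2)
      if pp = 0 then out else out ++ [(ii, pp)]) acc
    = acc ++ pvClampList dim max_power word := by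
  induction word generalizing acc with
  | nil => simp [pvClampList]
  | cons t rest ih =>
    obtain ⟨i, p⟩ := t
    simp only [List.foldl_cons, pvClampList]
    by_cases h : max (-max_power) (min max_power p) = 0
    · simp [h, ih]
    · simp [h, ih]

theorem pvClamp_idem (mp x : Int) :
    max (-mp) (min mp (max (-mp) (min mp x))) = max (-mp) (min mp x) := by omega

-- the B state (rdone, top) denotes the Python list done + [top]
def pvDenote (st : List (Int × Int) × Option (Int × Int)) : List (Int × Int) :=
  st.1.reverse ++ (match st.2 with | some t => [t] | none => [])

theorem pvSimplify_eq_reg (dim mp mwl : Int) (word : List (Int × Int))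
    (rdone : List (Int × Int)) (top : Option (Int × Int))
    (hinv : top = none → rdone = []) :
    pvSimplifyAux mp mwl (pvDenote (rdone, top)) (pvClampList dim mp word)
    = pvDenote (pvRegAux dim mp mwl rdone top word) := by
  induction word generalizing rdone top with
  | nil => simp [pvClampList, pvSimplifyAux, pvRegAux]
  | cons t rest ih =>
    obtain ⟨i, p⟩ := t
    simp only [pvClampList, pvRegAux]
    by_cases h : max (-mp) (min mp p) = 0
    · simp only [h]
      exact ih rdone top hinv
    · simp only [if_neg h]
      cases top with
      | none =>
        have hr : rdone = [] := hinv rfl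
        subst hr
        simp only [pvDenote, List.reverse_nil, List.nil_append, pvSimplifyAux,
          pvClamp_idem, if_neg h, List.getLast?_nil]
        by_cases hc : mwl ≤ 1
        · rw [if_pos (by simp; exact_mod_cast hc), if_pos (by simpa using hc)]
          simp
        · rw [if_neg (by simp; omega), if_neg (by simpa using hc)]
          have := ih [] (some (max 1 (min (dim - 1) i), max (-mp) (min mp p))) (by simp)
          simpa [pvDenote] using this
      | some jq =>
        obtain ⟨j, q⟩ := jq
        simp only [pvDenote, pvSimplifyAux, pvClamp_idem, if_neg h, List.getLast?_concat]
        by_cases hj : j = max 1 (min (dim - 1) i)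
        · rw [if_pos hj, if_pos hj]
          by_cases hs : max (-mp) (min mp (q + max (-mp) (min mp p))) = 0
          · rw [if_pos hs]
            have hd : ((rdone.reverse ++ [(j, q)]).dropLast ++
                [(max 1 (min (dim - 1) i), (0 : Int))]).dropLast
                = rdone.reverse := by simp
            rw [hs, if_pos rfl, hd]
            cases rdone with
            | nil => simpa [pvDenote] using ih [] none (fun _ => rfl)
            | cons u us =>
              have := ih us (some u) (by simp)
              simpa [pvDenote] using this
          · rw [if_neg hs, if_neg hs, List.dropLast_concat]
            have := ih rdone
              (some (max 1 (min (dim - 1) i),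
                max (-mp) (min mp (q + max (-mp) (min mp p))))) (by simp)
            simpa [pvDenote] using this
        · rw [if_neg hj, if_neg hj]
          have hlen : ((rdone.reverse ++ [(j, q)] ++
              [(max 1 (min (dim - 1) i), max (-mp) (min mp p))]).length : Int)
              = (rdone.length : Int) + 1 + 1 := by simp; ring
          by_cases hc : mwl ≤ (rdone.length : Int) + 1 + 1
          · rw [if_pos (by rw [hlen]; exact hc), if_pos (by simpa using hc)]
            simp
          · rw [if_neg (by rw [hlen]; exact hc), if_neg (by simpa using hc)]
            have := ih ((j, q) :: rdone)
              (some (max 1 (min (dim - 1) i), max (-mp) (min mp p))) (by simp)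
            simpa [pvDenote] using this

-- ===== VERDICT =====
theorem clamp_word_to_dim_spec : Claim_equal_clamp_word_to_dim := by
  intro word dim mp mwl _
  unfold Spec_clamp_word_to_dim clamp_word_to_dim clamp_word_to_dim_alt pvSimplifyWord
  rw [pvFoldl_eq_clampList, List.nil_append]
  have := pvSimplify_eq_reg dim mp mwl word [] none (fun _ => rfl)
  simpa [pvDenote] using this
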